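-- pv_equiv track=rewrite | github.com/axitag/compiler-assignments | src/lab-01/Regex_1.py | checkAcceptence
-- ===== SOURCE A (Python) =====
-- def checkAcceptence(string: str) -> bool:
--
--     isAccepted: bool = True
--
--     # If the string is of lenght 0 i.e epsilon
--     if len(string) == 0:
--         isAccepted = True
--     # only if the string contains 0 after 1 will it get rejected
--     elif string[0] == "0" and string[-1] == "1":
--         for idx, char in enumerate(string):
--             if char == "0" or char == "1":
--                 if idx < len(string) - 1:
--                     if char == "1" and string[idx + 1] == "0":
--                         isAccepted = False
--                         break
--             else:
--                 isAccepted = False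
--                 break
--     elif string[0] == "0":
--         for idx, char in enumerate(string):
--             if char != "0":
--                 isAccepted = False
--                 break
--     elif string[0] == "1":
--         for idx, char in enumerate(string):
--             if char != "1":
--                 isAccepted = False
--                 break
--     else:
--         isAccepted = False
--     return isAccepted
-- ===== SOURCE B (Python) =====
-- def checkAcceptence(string: str) -> bool:
--     seen_one = False
--     for ch in string:
--         if ch == '1':
--             seen_one = True
--         elif ch == '0':
--             if seen_one:
--                 return False
--         else:
--             return False
--     return True
-- ===== Notes on version B (the rewrite author's own statement) =====
-- stated objective: simpler
-- what changed: Replaces A's four-way case split on the first and last characters (with three different scan loops, one using a lookahead at idx+1) by a single uniform pass carrying one seen_one flag.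
import Mathlib
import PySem

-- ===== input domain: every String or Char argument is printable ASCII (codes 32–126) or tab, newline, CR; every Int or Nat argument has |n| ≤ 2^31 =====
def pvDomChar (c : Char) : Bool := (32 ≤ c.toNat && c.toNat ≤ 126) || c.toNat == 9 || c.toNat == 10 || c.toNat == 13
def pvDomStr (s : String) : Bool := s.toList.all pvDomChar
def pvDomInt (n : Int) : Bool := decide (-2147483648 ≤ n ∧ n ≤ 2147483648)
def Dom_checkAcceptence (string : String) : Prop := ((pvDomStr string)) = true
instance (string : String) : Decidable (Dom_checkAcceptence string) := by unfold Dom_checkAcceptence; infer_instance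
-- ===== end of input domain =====

-- B replaces A's four-way case split on first/last characters by one uniform scan with a seen_one flag (objective: simpler).

-- ===== PORT A =====
-- A's first loop (branch string[0]=='0' and string[-1]=='1'): enumerate with lookahead
-- string[idx+1]; 'idx < len(string)-1' becomes 'rest ≠ []' and string[idx+1] the head of rest.
def pvLoopMixed : List Char → Bool
  | [] => true
  | c :: rest =>
    if c = '0' ∨ c = '1' then
      match rest with
      | [] => pvLoopMixed rest
      | d :: _ => if c = '1' ∧ d = '0' then false else pvLoopMixed rest
    else false

-- A's second loop: break with False at the first char ≠ '0'
def pvLoopZeros : List Char → Bool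
  | [] => true
  | c :: rest => if c ≠ '0' then false else pvLoopZeros rest

-- A's third loop: break with False at the first char ≠ '1'
def pvLoopOnes : List Char → Bool
  | [] => true
  | c :: rest => if c ≠ '1' then false else pvLoopOnes rest

def checkAcceptence (string : String) : Bool :=
  let s := string.toList
  if s.length = 0 then true
  else if PySem.List.pyGet? s 0 = some '0' ∧ PySem.List.pyGet? s (-1) = some '1' then
    pvLoopMixed s
  else if PySem.List.pyGet? s 0 = some '0' then pvLoopZeros s
  else if PySem.List.pyGet? s 0 = some '1' then pvLoopOnes s
  else false

-- ===== PORT B =====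
-- single pass with the seen_one flag (early return False = result false)
def pvAltLoop : List Char → Bool → Bool
  | [], _ => true
  | c :: rest, seen =>
    if c = '1' then pvAltLoop rest true
    else if c = '0' then (if seen then false else pvAltLoop rest seen)
    else false

def checkAcceptence_alt (string : String) : Bool :=
  pvAltLoop string.toList false

-- ===== PRECONDITION & SPEC =====
def Spec_checkAcceptence (string : String) (out : Bool) : Prop := out = checkAcceptence_alt string
instance (string : String) (out : Bool) : Decidable (Spec_checkAcceptence string out) := by unfold Spec_checkAcceptence; infer_instance

-- ===== CLAIM (what is proved, stated in full; the proofs are below) =====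
def Claim_equal_checkAcceptence : Prop := ∀ (string : String), Dom_checkAcceptence string → Spec_checkAcceptence string (checkAcceptence string)

-- ===== LEMMAS AND PROOFS =====

theorem pvLoopOnes_eq_alt_true : ∀ l : List Char, pvLoopOnes l = pvAltLoop l true := by
  intro l
  induction l with
  | nil => rfl
  | cons c rest ih =>
    conv_lhs => rw [pvLoopOnes]
    conv_rhs => rw [pvAltLoop]
    by_cases h1 : c = '1'
    · simp [h1, ih]
    · by_cases h0 : c = '0' <;> simp [h1, h0]

theorem pvLoopMixed_one_cons : ∀ r : List Char, pvLoopMixed ('1' :: r) = pvAltLoop r true := by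
  intro r
  induction r with
  | nil => rfl
  | cons d r2 ih =>
    conv_lhs => rw [pvLoopMixed]
    conv_rhs => rw [pvAltLoop]
    by_cases hd0 : d = '0'
    · simp [hd0]
    · by_cases hd1 : d = '1'
      · subst hd1; simp [ih]
      · simp only [hd0, hd1]
        simp [pvLoopMixed, hd0, hd1]

theorem pvLoopMixed_eq_alt : ∀ l : List Char, pvLoopMixed l = pvAltLoop l false := by
  intro l
  induction l with
  | nil => rfl
  | cons c rest ih =>
    by_cases h1 : c = '1'
    · subst h1
      rw [pvLoopMixed_one_cons]
      conv_rhs => rw [pvAltLoop]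
      simp
    · by_cases h0 : c = '0'
      · subst h0
        cases rest with
        | nil => rfl
        | cons d r2 =>
          conv_lhs => rw [pvLoopMixed.eq_def]
          conv_rhs => rw [pvAltLoop]
          simp [ih]
      · conv_lhs => rw [pvLoopMixed.eq_def]
        conv_rhs => rw [pvAltLoop]
        simp [h0, h1]

theorem pvLoopZeros_eq_alt : ∀ l : List Char, l ≠ [] → l.getLast? ≠ some '1' →
    pvLoopZeros l = pvAltLoop l false ∧ pvAltLoop l true = false := by
  intro l
  induction l with
  | nil => intro h; exact absurd rfl h
  | cons c rest ih =>
    intro _ hlast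
    cases rest with
    | nil =>
      have hc : c ≠ '1' := by simpa [List.getLast?] using hlast
      constructor
      · by_cases h0 : c = '0' <;> simp [pvLoopZeros, pvAltLoop, h0, hc]
      · by_cases h0 : c = '0' <;> simp [pvAltLoop, h0, hc]
    | cons d r2 =>
      have hlast' : (d :: r2).getLast? ≠ some '1' := by
        simpa [List.getLast?_cons_cons] using hlast
      obtain ⟨ih1, ih2⟩ := ih (by simp) hlast'
      by_cases h1 : c = '1'
      · subst h1
        refine ⟨?_, ?_⟩
        · have hr : pvAltLoop ('1' :: d :: r2) false = false := by
            conv_lhs => rw [pvAltLoop]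
            simp [ih2]
          rw [hr]
          simp [pvLoopZeros]
        · conv_lhs => rw [pvAltLoop]
          simp [ih2]
      · by_cases h0 : c = '0'
        · subst h0
          refine ⟨?_, ?_⟩
          · conv_lhs => rw [pvLoopZeros]
            conv_rhs => rw [pvAltLoop]
            simp [ih1]
          · conv_lhs => rw [pvAltLoop]
            simp
        · refine ⟨?_, ?_⟩
          · conv_lhs => rw [pvLoopZeros]
            conv_rhs => rw [pvAltLoop]
            simp [h0, h1]
          · conv_lhs => rw [pvAltLoop]
            simp [h0, h1]

-- ===== VERDICT (by name: the statement is the Claim_ definition above) =====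
theorem checkAcceptence_spec : Claim_equal_checkAcceptence := by
  unfold Claim_equal_checkAcceptence
  intro string _
  unfold Spec_checkAcceptence checkAcceptence checkAcceptence_alt
  cases hl : string.toList with
  | nil => simp [pvAltLoop]
  | cons c rest =>
    rw [if_neg (by simp : ¬((c :: rest).length = 0))]
    have hget0 : PySem.List.pyGet? (c :: rest) 0 = some c := by
      exact PySem.List.pyGet?_zero_cons _ _
    have hgetn1 : PySem.List.pyGet? (c :: rest) (-1) = (c :: rest).getLast? := by
      exact PySem.List.pyGet?_neg_one _
    rw [hget0, hgetn1]
    by_cases h0 : c = '0'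
    · subst h0
      by_cases hlast : (('0':Char) :: rest).getLast? = some '1'
      · rw [if_pos (And.intro rfl hlast)]
        exact pvLoopMixed_eq_alt _
      · rw [if_neg (fun h => hlast h.2), if_pos rfl]
        exact (pvLoopZeros_eq_alt _ (by simp) hlast).1
    · have hne0 : ¬ (some c = some ('0':Char)) := fun h => h0 (by simpa using h)
      rw [if_neg (fun h => hne0 h.1), if_neg hne0]
      by_cases h1 : c = '1'
      · subst h1
        rw [if_pos rfl, pvLoopOnes_eq_alt_true]
        conv_lhs => rw [pvAltLoop]
        conv_rhs => rw [pvAltLoop]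
        simp
      · rw [if_neg (fun h => h1 (by simpa using h))]
        conv_rhs => rw [pvAltLoop]
        simp [h0, h1]
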